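-- pv_equiv track=rewrite | github.com/gustavnorens/aoc-2023 | solutions/bulle.py | rock_it
-- ===== SOURCE A (Python) =====
-- def rock_it(mat: tuple[tuple[int, ...], ...]) -> tuple[tuple[int, ...], ...]:
--     new_matrix = []
--     rlen = len(mat[0]) - 1
--     for row in mat:
--         stack = []
--         waiting_rocks = []
--         for i in range(rlen, -1, -1):
--             c = row[i]
--             if c == 2:
--                 waiting_rocks.append(c)
--                 continue
--             if not c:
--                 stack.extend(waiting_rocks)
--                 waiting_rocks.clear()
--             stack.append(c)
--         stack.extend(waiting_rocks)
--         waiting_rocks.clear()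
--         new_matrix.append(tuple(stack))
--     return tuple(new_matrix)
-- ===== SOURCE B (Python) =====
-- def rock_it(mat: tuple[tuple[int, ...], ...]) -> tuple[tuple[int, ...], ...]:
--     n = len(mat[0])
--     result = []
--     for row in mat:
--         r = [row[i] for i in range(n - 1, -1, -1)]
--         out = []
--         start = 0
--         while True:
--             try:
--                 z = r.index(0, start)
--             except ValueError:
--                 seg = r[start:]
--                 out += [c for c in seg if c != 2] + [2] * seg.count(2)
--                 break
--             seg = r[start:z]
--             out += [c for c in seg if c != 2] + [2] * seg.count(2) + [0]
--             start = z + 1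
--         result.append(tuple(out))
--     return tuple(result)
-- ===== Notes on version B (the rewrite author's own statement) =====
-- stated objective: alternative
-- what changed: Replaces A's per-cell stack/waiting-rock buffer with a segment decomposition: reverse the row by indexing, split it at the 0s (r.index), and emit each segment as its non-2 elements followed by a counted block of 2s, so no per-element state machine is maintained.
-- outside the precondition, e.g. on rock_it(()): A raises IndexError, B raises IndexError; on rock_it(((1, 0, 2), (1,))): A raises IndexError, B raises IndexError
import Mathlib
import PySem

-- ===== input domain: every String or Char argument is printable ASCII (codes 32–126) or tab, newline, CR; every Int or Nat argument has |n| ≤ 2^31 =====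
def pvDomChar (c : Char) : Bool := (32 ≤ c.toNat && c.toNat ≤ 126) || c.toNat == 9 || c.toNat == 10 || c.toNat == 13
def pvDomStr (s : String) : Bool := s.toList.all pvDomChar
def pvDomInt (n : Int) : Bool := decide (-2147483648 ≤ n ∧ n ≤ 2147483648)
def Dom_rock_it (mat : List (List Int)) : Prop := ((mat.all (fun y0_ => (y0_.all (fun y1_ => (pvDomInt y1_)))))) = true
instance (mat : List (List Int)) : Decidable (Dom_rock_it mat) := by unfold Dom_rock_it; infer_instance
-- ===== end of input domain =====

-- B replaces A's per-cell stack/waiting-rock buffer by splitting the reversed row into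
-- zero-delimited segments and emitting filter + counted 2s per segment (objective: alternative).

-- ===== PORT A =====
-- one row: fold over range(rlen, -1, -1), carrying (stack, waiting_rocks);
-- row[i] is total here via getD 0 — Pre_ excludes the inputs where Python raises IndexError
def rockItRowA (rlen : Int) (row : List Int) : List Int :=
  let p := (PySem.List.pyRange rlen (-1) (-1)).foldl
    (fun (sw : List Int × List Int) i =>
      let c := (PySem.List.pyGet? row i).getD 0
      if c = 2 then (sw.1, sw.2 ++ [c])
      else if c = 0 then (sw.1 ++ sw.2 ++ [c], [])
      else (sw.1 ++ [c], sw.2))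
    ([], [])
  p.1 ++ p.2

def rock_it (mat : List (List Int)) : List (List Int) :=
  let rlen : Int := (Int.ofNat (mat.headD []).length) - 1
  mat.map (rockItRowA rlen)

-- ===== PORT B =====
-- Source B's inner while loop: find the next 0 (r.index(0, start)); takeWhile/dropWhile play the
-- role of index+slice: seg = elements before the next 0, the rest follows the 0
def rockSegs (r : List Int) : List Int :=
  let seg := r.takeWhile (· ≠ 0)
  match h : r.dropWhile (· ≠ 0) with
  | [] => seg.filter (· ≠ 2) ++ List.replicate (seg.count 2) 2
  | _ :: tl => seg.filter (· ≠ 2) ++ List.replicate (seg.count 2) 2 ++ [0] ++ rockSegs tl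
termination_by r.length
decreasing_by
  have hle := List.length_dropWhile_le (p := fun x => decide (x ≠ 0)) (l := r)
  rw [h] at hle; simp at hle; omega

def rock_it_alt (mat : List (List Int)) : List (List Int) :=
  let n : Int := Int.ofNat (mat.headD []).length
  mat.map (fun row =>
    rockSegs ((PySem.List.pyRange (n - 1) (-1) (-1)).map
      (fun i => (PySem.List.pyGet? row i).getD 0)))

-- ===== PRECONDITION & SPEC =====
-- Pre_ excludes exactly the inputs where Python A raises IndexError: the empty matrix
-- (mat[0]) and matrices containing a row shorter than the first row (row[i]).
def Pre_rock_it (mat : List (List Int)) : Prop :=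
  mat ≠ [] ∧ ∀ row ∈ mat, (mat.headD []).length ≤ row.length
instance (mat : List (List Int)) : Decidable (Pre_rock_it mat) := by unfold Pre_rock_it; infer_instance
def pvWitness_rock_it : List (List Int) := [[2, 0, 1, 2, 0], [0, 0, 2, 2, 1]]

def Spec_rock_it (mat : List (List Int)) (out : List (List Int)) : Prop := out = rock_it_alt mat
instance (mat : List (List Int)) (out : List (List Int)) : Decidable (Spec_rock_it mat out) := by unfold Spec_rock_it; infer_instance

-- ===== CLAIM (what is proved, stated in full; the proofs are below) =====
def Claim_equal_rock_it : Prop := ∀ (mat : List (List Int)), Dom_rock_it mat → Pre_rock_it mat → Spec_rock_it mat (rock_it mat)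

-- ===== LEMMAS AND PROOFS =====

-- the single step of A's inner loop, on the cell value
def stepA (sw : List Int × List Int) (c : Int) : List Int × List Int :=
  if c = 2 then (sw.1, sw.2 ++ [c])
  else if c = 0 then (sw.1 ++ sw.2 ++ [c], [])
  else (sw.1 ++ [c], sw.2)

-- rockSegs with k pending 2s merged into the first segment
def out2 (k : Nat) (r : List Int) : List Int :=
  let tw := r.takeWhile (· ≠ 0)
  match r.dropWhile (· ≠ 0) with
  | [] => tw.filter (· ≠ 2) ++ List.replicate (k + tw.count 2) 2
  | _ :: tl => tw.filter (· ≠ 2) ++ List.replicate (k + tw.count 2) 2 ++ [0] ++ rockSegs tl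

lemma out2_zero (r : List Int) : out2 0 r = rockSegs r := by
  rw [out2, rockSegs]
  cases h : r.dropWhile (· ≠ 0) <;> simp

lemma out2_nil (k : Nat) : out2 k [] = List.replicate k 2 := by
  simp [out2, List.takeWhile, List.dropWhile]

lemma out2_two (k : Nat) (r : List Int) : out2 k (2 :: r) = out2 (k + 1) r := by
  rw [out2, out2]
  simp only [List.takeWhile_cons, List.dropWhile_cons]
  norm_num
  cases h : r.dropWhile (· ≠ 0) <;>
    simp [Nat.add_comm, Nat.add_assoc]

lemma out2_zero_cons (k : Nat) (r : List Int) :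
    out2 k (0 :: r) = List.replicate k 2 ++ 0 :: rockSegs r := by
  rw [out2]
  simp

lemma out2_other (k : Nat) (c : Int) (r : List Int) (h2 : c ≠ 2) (h0 : c ≠ 0) :
    out2 k (c :: r) = c :: out2 k r := by
  rw [out2, out2]
  simp only [List.takeWhile_cons, List.dropWhile_cons]
  cases h : r.dropWhile (· ≠ 0) <;> simp [h0, h2]

-- key invariant: folding A's step over r from (s, k held 2s) yields s ++ out2 k r
lemma fold_stepA (r : List Int) : ∀ (s : List Int) (k : Nat),
    (r.foldl stepA (s, List.replicate k 2)).1 ++ (r.foldl stepA (s, List.replicate k 2)).2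
      = s ++ out2 k r := by
  induction r with
  | nil => intro s k; simp [out2_nil]
  | cons c r ih =>
    intro s k
    by_cases h2 : c = 2
    · subst h2
      have hs : stepA (s, List.replicate k 2) 2 = (s, List.replicate (k + 1) 2) := by
        simp [stepA, List.replicate_succ']
      rw [List.foldl_cons, hs, ih, out2_two]
    · by_cases h0 : c = 0
      · subst h0
        have hs : stepA (s, List.replicate k 2) 0
            = (s ++ List.replicate k 2 ++ [0], List.replicate 0 2) := by
          simp [stepA]
        rw [List.foldl_cons, hs, ih, out2_zero, out2_zero_cons]
        simp
      · have hs : stepA (s, List.replicate k 2) c = (s ++ [c], List.replicate k 2) := by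
          simp [stepA, h2, h0]
        rw [List.foldl_cons, hs, ih, out2_other k c r h2 h0]
        simp

lemma row_eq (rlen : Int) (row : List Int) :
    rockItRowA rlen row
      = rockSegs ((PySem.List.pyRange rlen (-1) (-1)).map
          (fun i => (PySem.List.pyGet? row i).getD 0)) := by
  unfold rockItRowA
  rw [show (fun (sw : List Int × List Int) i =>
      let c := (PySem.List.pyGet? row i).getD 0
      if c = 2 then (sw.1, sw.2 ++ [c])
      else if c = 0 then (sw.1 ++ sw.2 ++ [c], [])
      else (sw.1 ++ [c], sw.2))
    = (fun sw i => stepA sw ((PySem.List.pyGet? row i).getD 0)) from rfl]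
  rw [← List.foldl_map (f := fun i => (PySem.List.pyGet? row i).getD 0) (g := stepA)]
  have h := fold_stepA ((PySem.List.pyRange rlen (-1) (-1)).map
      (fun i => (PySem.List.pyGet? row i).getD 0)) [] 0
  simpa [out2_zero] using h

-- ===== VERDICT (by name: the statement is the Claim_ definition above) =====
theorem rock_it_spec : Claim_equal_rock_it := by
  intro mat _ _
  unfold Spec_rock_it rock_it rock_it_alt
  apply List.map_congr_left
  intro row _
  exact row_eq _ row
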